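-- pv_equiv track=rewrite | github.com/AminAden1/Phishing_Detection | technique1.py | benign_paraphrase
-- ===== SOURCE A (Python) =====
-- def benign_paraphrase(text):
--     repl = {
--         "log in": "sign in",
--         "verify": "confirm",
--         "account": "user account",
--     }
--     for a, b in repl.items():
--         text = text.replace(a, b).replace(a.capitalize(), b.capitalize())
--     return text
-- ===== SOURCE B (Python) =====
-- def benign_paraphrase(text):
--     table = [
--         ("log in", "sign in"),
--         ("Log in", "Sign in"),
--         ("verify", "confirm"),
--         ("Verify", "Confirm"),
--         ("account", "user account"),
--         ("Account", "User account"),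
--     ]
--     out = []
--     i = 0
--     n = len(text)
--     while i < n:
--         for a, b in table:
--             if text.startswith(a, i):
--                 out.append(b)
--                 i += len(a)
--                 break
--         else:
--             out.append(text[i])
--             i += 1
--     return "".join(out)
-- ===== Notes on version B (the rewrite author's own statement) =====
-- stated objective: alternative
-- what changed: B replaces the six sequential whole-text str.replace passes by a single left-to-right scan that, at each position, matches the first of the six literal phrase/replacement pairs and emits its replacement (correct because no replacement or pattern overlaps another pattern).
import Mathlib
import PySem

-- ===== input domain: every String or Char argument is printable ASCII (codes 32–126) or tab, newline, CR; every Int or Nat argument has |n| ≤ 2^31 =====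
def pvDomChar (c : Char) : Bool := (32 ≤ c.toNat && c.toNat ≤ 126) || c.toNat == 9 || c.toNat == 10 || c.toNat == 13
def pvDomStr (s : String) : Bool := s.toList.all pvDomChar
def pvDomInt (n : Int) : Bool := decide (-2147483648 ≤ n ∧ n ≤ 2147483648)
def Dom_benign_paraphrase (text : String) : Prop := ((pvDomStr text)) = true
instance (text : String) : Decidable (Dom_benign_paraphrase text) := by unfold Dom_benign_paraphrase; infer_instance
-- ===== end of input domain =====

-- B replaces A's six sequential whole-text str.replace passes by one left-to-right scan over a
-- table of the six phrase/replacement pairs (objective: alternative single-pass algorithm).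

-- ===== PORT A =====
-- str.capitalize(): first char uppercased, the rest lowercased (exact on the ASCII domain)
def pvCapitalize (s : List Char) : List Char :=
  match s with
  | [] => []
  | c :: t => PySem.Chars.upperChar c :: PySem.Chars.lower t

def benign_paraphrase (text : String) : String :=
  let repl : PySem.Dict String String :=
    PySem.Dict.ofList [("log in", "sign in"), ("verify", "confirm"), ("account", "user account")]
  repl.items.foldl (fun t ab =>
    PySem.Str.replace (PySem.Str.replace t ab.1 ab.2)
      (String.ofList (pvCapitalize ab.1.toList)) (String.ofList (pvCapitalize ab.2.toList))) text

-- ===== PORT B =====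
-- the hard-coded phrase table of Source B, on code points
def pvTable : List (List Char × List Char) :=
  [("log in".toList, "sign in".toList), ("Log in".toList, "Sign in".toList),
   ("verify".toList, "confirm".toList), ("Verify".toList, "Confirm".toList),
   ("account".toList, "user account".toList), ("Account".toList, "User account".toList)]

-- Source B's while loop: at each position emit the first matching pair's replacement and skip the
-- phrase, else copy one char; fuel = remaining length bounds the loop (each step consumes ≥ 1 char)
def pvScanGo (T : List (List Char × List Char)) : Nat → List Char → List Char
  | 0, l => l
  | _ + 1, [] => []
  | fuel + 1, c :: t =>
    match T.find? (fun p => p.1.isPrefixOf (c :: t)) with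
    | some p => p.2 ++ pvScanGo T fuel (List.drop p.1.length (c :: t))
    | none => c :: pvScanGo T fuel t

def benign_paraphrase_alt (text : String) : String :=
  String.ofList (pvScanGo pvTable text.toList.length text.toList)

-- ===== PRECONDITION & SPEC =====
def Spec_benign_paraphrase (text : String) (out : String) : Prop := out = benign_paraphrase_alt text
instance (text : String) (out : String) : Decidable (Spec_benign_paraphrase text out) := by unfold Spec_benign_paraphrase; infer_instance

-- ===== CLAIM (what is proved, stated in full; the proofs are below) =====
def Claim_equal_benign_paraphrase : Prop := ∀ (text : String), Dom_benign_paraphrase text → Spec_benign_paraphrase text (benign_paraphrase text)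

-- ===== LEMMAS AND PROOFS =====

-- a fuel-indexed, accumulator-free model of PySem.Chars.replace.go
def pvRepM (old new : List Char) : Nat → List Char → List Char
  | 0, l => l
  | _ + 1, [] => []
  | fuel + 1, c :: t =>
    if old.isPrefixOf (c :: t) then new ++ pvRepM old new fuel (List.drop old.length (c :: t))
    else c :: pvRepM old new fuel t

theorem pvGo_eq (old new : List Char) : ∀ (fuel : Nat) (l acc : List Char),
    PySem.Chars.replace.go old new fuel l acc = acc.reverse ++ pvRepM old new fuel l := by
  intro fuel
  induction fuel with
  | zero => intro l acc; simp [PySem.Chars.replace.go, pvRepM]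
  | succ f ih =>
    intro l acc
    cases l with
    | nil => simp [PySem.Chars.replace.go, pvRepM]
    | cons c t =>
      rw [PySem.Chars.replace.go]
      by_cases h : old.isPrefixOf (c :: t)
      · simp [h, pvRepM, ih]
      · simp [h, pvRepM, ih]

theorem pvReplace_eq (old new l : List Char) (h : old ≠ []) :
    PySem.Chars.replace l old new = pvRepM old new l.length l := by
  rw [PySem.Chars.replace]
  simp [List.isEmpty_iff, h, pvGo_eq]

theorem pvRepM_fuel (old new : List Char) (h : old ≠ []) :
    ∀ (f1 : Nat), ∀ (f2 : Nat) (l : List Char), l.length ≤ f1 → l.length ≤ f2 →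
      pvRepM old new f1 l = pvRepM old new f2 l := by
  intro f1
  induction f1 with
  | zero =>
    intro f2 l h1 _
    have : l = [] := List.length_eq_zero_iff.mp (Nat.le_zero.mp h1)
    subst this
    cases f2 <;> simp [pvRepM]
  | succ f ih =>
    intro f2 l h1 h2
    cases l with
    | nil => cases f2 <;> simp [pvRepM]
    | cons c t =>
      cases f2 with
      | zero => simp at h2
      | succ f2' =>
        have hol : 1 ≤ old.length := by
          cases old with
          | nil => exact absurd rfl h
          | cons _ _ => simp
        simp only [List.length_cons] at h1 h2
        have hd : (List.drop old.length (c :: t)).length = t.length + 1 - old.length := by simp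
        by_cases hp : old.isPrefixOf (c :: t)
        · simp only [pvRepM, hp, if_true]
          rw [ih f2' (List.drop old.length (c :: t)) (by rw [hd]; omega) (by rw [hd]; omega)]
        · simp only [pvRepM, hp]
          simp [ih f2' t (by omega) (by omega)]

theorem pvReplace_nil (old new : List Char) (h : old ≠ []) :
    PySem.Chars.replace [] old new = [] := by
  rw [pvReplace_eq _ _ _ h]; simp [pvRepM]

theorem pvReplace_pos (old new l : List Char) (h : old ≠ []) (hp : old <+: l) :
    PySem.Chars.replace l old new =
      new ++ PySem.Chars.replace (List.drop old.length l) old new := by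
  have hol : 1 ≤ old.length := by
    cases old with
    | nil => exact absurd rfl h
    | cons _ _ => simp
  cases l with
  | nil => exact absurd (List.prefix_nil.mp hp) h
  | cons c t =>
    rw [pvReplace_eq _ _ _ h, pvReplace_eq _ _ _ h]
    simp only [List.length_cons, pvRepM, List.isPrefixOf_iff_prefix, hp, if_true]
    congr 1
    exact pvRepM_fuel old new h t.length (List.drop old.length (c :: t)).length
      (List.drop old.length (c :: t)) (by simp; omega) (le_refl _)

theorem pvReplace_neg (old new : List Char) (c : Char) (t : List Char) (h : old ≠ [])
    (hp : ¬ old <+: (c :: t)) :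
    PySem.Chars.replace (c :: t) old new = c :: PySem.Chars.replace t old new := by
  rw [pvReplace_eq _ _ _ h, pvReplace_eq _ _ _ h]
  simp only [List.length_cons, pvRepM, List.isPrefixOf_iff_prefix, hp, if_false]


-- no occurrence of a starts inside x (neither contained nor crossing x's right end)
def pvNoOv (x a : List Char) : Bool :=
  (List.range x.length).all (fun j => !((List.drop j x).isPrefixOf a) && !(a.isPrefixOf (List.drop j x)))

theorem pvNoOv_head {x a : List Char} (h : pvNoOv x a = true) (hx : x ≠ []) :
    ¬ x <+: a ∧ ¬ a <+: x := by
  have hx0 : 0 < x.length := List.length_pos_iff.mpr hx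
  have := (List.all_eq_true.mp h) 0 (List.mem_range.mpr hx0)
  simp only [List.drop_zero, Bool.and_eq_true, Bool.not_eq_eq_eq_not, Bool.not_true] at this
  exact ⟨by simp [← List.isPrefixOf_iff_prefix, this.1], by simp [← List.isPrefixOf_iff_prefix, this.2]⟩

theorem pvNoOv_tail {c : Char} {x a : List Char} (h : pvNoOv (c :: x) a = true) :
    pvNoOv x a = true := by
  rw [pvNoOv, List.all_eq_true]
  intro j hj
  have := (List.all_eq_true.mp h) (j + 1) (by simp at hj ⊢; omega)
  simpa using this

theorem pvNoOv_suffix {x a v : List Char} (h : pvNoOv x a = true) (hv : v <:+ x) (hne : v ≠ []) :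
    ¬ v <+: a ∧ ¬ a <+: v := by
  obtain ⟨w, rfl⟩ := hv
  have hj : w.length < (w ++ v).length := by
    simp [List.length_append]
    exact List.length_pos_iff.mpr hne
  have := (List.all_eq_true.mp h) w.length (List.mem_range.mpr hj)
  rw [List.drop_left] at this
  simp only [Bool.and_eq_true, Bool.not_eq_eq_eq_not, Bool.not_true] at this
  exact ⟨by simp [← List.isPrefixOf_iff_prefix, this.1], by simp [← List.isPrefixOf_iff_prefix, this.2]⟩

theorem pvPrefix_cases {a x y : List Char} (h : a <+: x ++ y) : a <+: x ∨ x <+: a :=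
  List.prefix_or_prefix_of_prefix h (List.prefix_append x y)

theorem pvNoOv_not_prefix_append {x a y : List Char} (h : pvNoOv x a = true) (hx : x ≠ []) :
    ¬ a <+: x ++ y := by
  intro hp
  rcases pvPrefix_cases hp with h1 | h1
  · exact (pvNoOv_head h hx).2 h1
  · exact (pvNoOv_head h hx).1 h1

-- replace passes unchanged over a block x it cannot match into
theorem pvReplace_shield (old new : List Char) (h : old ≠ []) :
    ∀ (x y : List Char), pvNoOv x old = true →
      PySem.Chars.replace (x ++ y) old new = x ++ PySem.Chars.replace y old new := by
  intro x
  induction x with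
  | nil => intro y _; simp
  | cons c x' ih =>
    intro y hx
    have hnp : ¬ old <+: (c :: x') ++ y := pvNoOv_not_prefix_append hx (by simp)
    rw [List.cons_append, pvReplace_neg _ _ _ _ h (by simpa using hnp)]
    rw [ih y (pvNoOv_tail hx)]
    simp

-- a phrase none of whose suffixes overlaps the replacement block can match the output only where it matched the input
theorem pvMatchPull (old new a : List Char) (hp : old ≠ [])
    (hS : pvNoOv a new = true) :
    ∀ (l v : List Char), v <:+ a → v <+: PySem.Chars.replace l old new → v <+: l := by
  intro l
  induction hn : l.length using Nat.strong_induction_on generalizing l with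
  | _ n ih =>
  subst hn
  intro v hv hh
  cases l with
  | nil => rwa [pvReplace_nil _ _ hp] at hh
  | cons c t =>
    by_cases hpre : old <+: (c :: t)
    · rw [pvReplace_pos _ _ _ hp hpre] at hh
      cases hve : v with
      | nil => exact List.nil_prefix
      | cons v0 v' =>
        subst hve
        have hno := pvNoOv_suffix hS hv (by simp)
        rcases pvPrefix_cases hh with h1 | h1
        · exact absurd h1 hno.1
        · exact absurd h1 hno.2
    · rw [pvReplace_neg _ _ _ _ hp hpre] at hh
      cases hve : v with
      | nil => exact List.nil_prefix
      | cons v0 v' =>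
        subst hve
        rw [List.cons_prefix_cons] at hh ⊢
        refine ⟨hh.1, ?_⟩
        have hv' : v' <:+ a := List.IsSuffix.trans ⟨[v0], rfl⟩ hv
        exact ih t.length (by simp) t rfl v' hv' hh.2

theorem pvScan_fuel (T : List (List Char × List Char)) (hne : ∀ q ∈ T, q.1 ≠ []) :
    ∀ (f1 : Nat), ∀ (f2 : Nat) (l : List Char), l.length ≤ f1 → l.length ≤ f2 →
      pvScanGo T f1 l = pvScanGo T f2 l := by
  intro f1
  induction f1 with
  | zero =>
    intro f2 l h1 _
    have : l = [] := List.length_eq_zero_iff.mp (Nat.le_zero.mp h1)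
    subst this
    cases f2 <;> simp [pvScanGo]
  | succ f ih =>
    intro f2 l h1 h2
    cases l with
    | nil => cases f2 <;> simp [pvScanGo]
    | cons c t =>
      cases f2 with
      | zero => simp at h2
      | succ f2' =>
        simp only [List.length_cons] at h1 h2
        cases hfind : T.find? (fun p => p.1.isPrefixOf (c :: t)) with
        | none =>
          simp only [pvScanGo, hfind]
          rw [ih f2' t (by omega) (by omega)]
        | some q =>
          have hq1 : q.1 ≠ [] := hne q (List.mem_of_find?_eq_some hfind)
          have hql : 1 ≤ q.1.length := by
            cases hv : q.1 with
            | nil => exact absurd hv hq1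
            | cons _ _ => simp
          have hd : (List.drop q.1.length (c :: t)).length = t.length + 1 - q.1.length := by simp
          simp only [pvScanGo, hfind]
          rw [ih f2' (List.drop q.1.length (c :: t)) (by rw [hd]; omega) (by rw [hd]; omega)]

theorem pvScan_match (T : List (List Char × List Char)) (hne : ∀ q ∈ T, q.1 ≠ [])
    {l : List Char} {q : List Char × List Char}
    (hfind : T.find? (fun p => p.1.isPrefixOf l) = some q) :
    pvScanGo T l.length l =
      q.2 ++ pvScanGo T (List.drop q.1.length l).length (List.drop q.1.length l) := by
  have hq1 : q.1 ≠ [] := hne q (List.mem_of_find?_eq_some hfind)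
  have hql : 1 ≤ q.1.length := by
    cases hv : q.1 with
    | nil => exact absurd hv hq1
    | cons _ _ => simp
  have hpre : q.1 <+: l := by
    have := List.find?_some hfind
    simpa [List.isPrefixOf_iff_prefix] using this
  cases l with
  | nil =>
    exact absurd (List.prefix_nil.mp hpre) hq1
  | cons c t =>
    simp only [List.length_cons, pvScanGo, hfind]
    congr 1
    have hd : (List.drop q.1.length (c :: t)).length = t.length + 1 - q.1.length := by simp
    exact pvScan_fuel T hne t.length _ _ (by rw [hd]; omega) (le_refl _)

theorem pvScan_nomatch (T : List (List Char × List Char)) {c : Char} {t : List Char}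
    (hfind : T.find? (fun p => p.1.isPrefixOf (c :: t)) = none) :
    pvScanGo T (c :: t).length (c :: t) = c :: pvScanGo T t.length t := by
  simp only [List.length_cons, pvScanGo, hfind]

theorem pvScan_empty : ∀ (l : List Char), pvScanGo [] l.length l = l := by
  intro l
  induction l with
  | nil => simp [pvScanGo]
  | cons c t ih => simpa [pvScanGo, List.find?] using ih

theorem pvScan_shield (T : List (List Char × List Char)) :
    ∀ (x y : List Char), (∀ q ∈ T, pvNoOv x q.1 = true) →
      pvScanGo T (x ++ y).length (x ++ y) = x ++ pvScanGo T y.length y := by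
  intro x
  induction x with
  | nil => intro y _; simp
  | cons c x' ih =>
    intro y hx
    have hfind : T.find? (fun p => p.1.isPrefixOf ((c :: x') ++ y)) = none := by
      rw [List.find?_eq_none]
      intro q hq
      simp only [List.isPrefixOf_iff_prefix]
      exact pvNoOv_not_prefix_append (hx q hq) (by simp)
    rw [List.cons_append, pvScan_nomatch T (by simpa using hfind)]
    rw [ih y (fun q hq => pvNoOv_tail (hx q hq))]
    simp

theorem pvFind_stable (T : List (List Char × List Char))
    (hSP : ∀ a ∈ T, ∀ b ∈ T, a.1 <+: b.1 → a.1 = b.1)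
    (q : List Char × List Char) (y z : List Char)
    (hfind : T.find? (fun p => p.1.isPrefixOf (q.1 ++ y)) = some q) :
    T.find? (fun p => p.1.isPrefixOf (q.1 ++ z)) = some q := by
  induction T with
  | nil => simp at hfind
  | cons q' T' ih =>
    have hq'' : q ∈ q' :: T' := List.mem_of_find?_eq_some hfind
    by_cases hq' : q'.1 <+: q.1 ++ y
    · rw [List.find?_cons_of_pos (by simpa [List.isPrefixOf_iff_prefix] using hq')] at hfind
      have hqq : q' = q := by simpa using hfind
      subst hqq
      rw [List.find?_cons_of_pos (by simp [List.isPrefixOf_iff_prefix])]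
    · rw [List.find?_cons_of_neg (by simpa [List.isPrefixOf_iff_prefix] using hq')] at hfind
      have hqmem : q ∈ T' := List.mem_of_find?_eq_some hfind
      have hq'z : ¬ q'.1 <+: q.1 ++ z := by
        intro hc
        rcases pvPrefix_cases hc with h1 | h1
        · have := hSP q' (by simp) q (by simp [hqmem]) h1
          exact hq' (this ▸ List.prefix_append _ _)
        · have := hSP q (by simp [hqmem]) q' (by simp) h1
          exact hq' (this ▸ List.prefix_append _ _)
      rw [List.find?_cons_of_neg (by simpa [List.isPrefixOf_iff_prefix] using hq'z)]
      exact ih (fun a ha b hb => hSP a (by simp [ha]) b (by simp [hb])) hfind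

-- the main peel: scanning with (p :: ps) = replacing p everywhere, then scanning with ps
theorem pvScan_cons (p : List Char × List Char) (ps : List (List Char × List Char))
    (hp1 : p.1 ≠ []) (hne : ∀ q ∈ ps, q.1 ≠ [])
    (hOv : ∀ q ∈ ps, pvNoOv p.2 q.1 = true)
    (hC2 : ∀ q ∈ ps, pvNoOv q.1 p.2 = true)
    (hC3 : ∀ q ∈ ps, pvNoOv q.1 p.1 = true)
    (hSP : ∀ a ∈ ps, ∀ b ∈ ps, a.1 <+: b.1 → a.1 = b.1) :
    ∀ (l : List Char),
      pvScanGo (p :: ps) l.length l =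
        pvScanGo ps (PySem.Chars.replace l p.1 p.2).length (PySem.Chars.replace l p.1 p.2) := by
  have hneT : ∀ q ∈ p :: ps, q.1 ≠ [] := by
    intro q hq
    rcases List.mem_cons.mp hq with h | h
    · exact h ▸ hp1
    · exact hne q h
  have hpl : 1 ≤ p.1.length := by
    cases hv : p.1 with
    | nil => exact absurd hv hp1
    | cons _ _ => simp
  intro l
  induction hn : l.length using Nat.strong_induction_on generalizing l with
  | _ n ih =>
  subst hn
  cases l with
  | nil =>
    rw [pvReplace_nil _ _ hp1]
    rfl
  | cons c t =>
    by_cases hp : p.1 <+: (c :: t)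
    · have hfind : (p :: ps).find? (fun q => q.1.isPrefixOf (c :: t)) = some p :=
        List.find?_cons_of_pos (by simpa [List.isPrefixOf_iff_prefix] using hp)
      rw [pvScan_match _ hneT hfind, pvReplace_pos _ _ _ hp1 hp]
      rw [pvScan_shield ps p.2 _ (fun q hq => hOv q hq)]
      congr 1
      have hd : (List.drop p.1.length (c :: t)).length = t.length + 1 - p.1.length := by simp
      exact ih (List.drop p.1.length (c :: t)).length (by rw [hd]; simp; omega) _ rfl
    · cases hfind : ps.find? (fun q => q.1.isPrefixOf (c :: t)) with
      | some q =>
        have hq1 : q.1 ≠ [] := hne q (List.mem_of_find?_eq_some hfind)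
        have hql : 1 ≤ q.1.length := by
          cases hv : q.1 with
          | nil => exact absurd hv hq1
          | cons _ _ => simp
        have hqpre : q.1 <+: (c :: t) := by
          have := List.find?_some hfind
          simpa [List.isPrefixOf_iff_prefix] using this
        obtain ⟨y, hy⟩ := hqpre
        have hfindT : (p :: ps).find? (fun q => q.1.isPrefixOf (c :: t)) = some q := by
          rw [List.find?_cons_of_neg (by simpa [List.isPrefixOf_iff_prefix] using hp)]
          exact hfind
        rw [pvScan_match _ hneT hfindT]
        have hrep : PySem.Chars.replace (c :: t) p.1 p.2 =
            q.1 ++ PySem.Chars.replace y p.1 p.2 := by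
          rw [← hy]
          exact pvReplace_shield p.1 p.2 hp1 q.1 y (hC3 q (List.mem_of_find?_eq_some hfind))
        rw [hrep]
        have hfind' : ps.find? (fun r => r.1.isPrefixOf (q.1 ++ PySem.Chars.replace y p.1 p.2)) = some q := by
          refine pvFind_stable ps hSP q y _ ?_
          rw [hy]; exact hfind
        rw [pvScan_match ps hne hfind']
        congr 1
        rw [List.drop_left]
        have hdl : List.drop q.1.length (c :: t) = y := by rw [← hy, List.drop_left]
        rw [hdl]
        have hlen : y.length < (c :: t).length := by
          rw [← hy]; simp; omega
        exact ih y.length (by simpa using hlen) y rfl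
      | none =>
        have hfindT : (p :: ps).find? (fun q => q.1.isPrefixOf (c :: t)) = none := by
          rw [List.find?_cons_of_neg (by simpa [List.isPrefixOf_iff_prefix] using hp)]
          exact hfind
        rw [pvScan_nomatch _ hfindT, pvReplace_neg _ _ _ _ hp1 hp]
        have hfind' : ps.find? (fun q => q.1.isPrefixOf (c :: PySem.Chars.replace t p.1 p.2)) = none := by
          rw [List.find?_eq_none]
          intro q hq
          simp only [List.isPrefixOf_iff_prefix]
          intro hc
          rw [← pvReplace_neg _ _ _ _ hp1 hp] at hc
          have := pvMatchPull p.1 p.2 q.1 hp1 (hC2 q hq) (c :: t) q.1 (List.suffix_refl _) hc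
          have hnone := List.find?_eq_none.mp hfind q hq
          simp [List.isPrefixOf_iff_prefix] at hnone
          exact hnone this
        rw [pvScan_nomatch ps hfind']
        congr 1
        exact ih t.length (by simp) t rfl

theorem pvChars_main (l : List Char) :
    pvScanGo pvTable l.length l = (PySem.Chars.replace (PySem.Chars.replace (PySem.Chars.replace (PySem.Chars.replace (PySem.Chars.replace (PySem.Chars.replace l "log in".toList "sign in".toList) "Log in".toList "Sign in".toList) "verify".toList "confirm".toList) "Verify".toList "Confirm".toList) "account".toList "user account".toList) "Account".toList "User account".toList) := by
  exact ((pvScan_cons ("log in".toList, "sign in".toList) [("Log in".toList, "Sign in".toList), ("verify".toList, "confirm".toList), ("Verify".toList, "Confirm".toList), ("account".toList, "user account".toList), ("Account".toList, "User account".toList)] (by decide) (by decide) (by decide) (by decide) (by decide) (by decide) l).trans ((pvScan_cons ("Log in".toList, "Sign in".toList) [("verify".toList, "confirm".toList), ("Verify".toList, "Confirm".toList), ("account".toList, "user account".toList), ("Account".toList, "User account".toList)] (by decide) (by decide) (by decide) (by decide) (by decide) (by decide) (PySem.Chars.replace l "log in".toList "sign in".toList)).trans ((pvScan_cons ("verify".toList,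 "confirm".toList) [("Verify".toList, "Confirm".toList), ("account".toList, "user account".toList), ("Account".toList, "User account".toList)] (by decide) (by decide) (by decide) (by decide) (by decide) (by decide) (PySem.Chars.replace (PySem.Chars.replace l "log in".toList "sign in".toList) "Log in".toList "Sign in".toList)).trans ((pvScan_cons ("Verify".toList, "Confirm".toList) [("account".toList, "user account".toList), ("Account".toList, "User account".toList)] (by decide) (by decide) (by decide) (by decide) (by decide) (by decide) (PySem.Chars.replace (PySem.Chars.replace (PySem.Chars.replace l "log in".toList "sign in".toList) "Log in".toList "Sign in".toList) "verify".toList "confirm".toList)).trans ((pvScan_cons ("account".toList, "user account".toList) [("Account".toList, "User account".toList)] (by decide) (by decide) (by decide) (by decide) (by decide) (by decide) (PySem.Chars.replace (PySem.Chars.replace (PySem.Chars.replace (PySem.Chars.replace l "log in".toList "sign in".toList) "Log in".toList "Sign in".toList) "verify".toList "confirm".toList) "Verify".toList "Confirm".toList)).trans ((pvScan_cons ("Account".toList, "User account".toList) [] (by decide) (by decide) (by decide) (by decide) (by decide) (by decide) (PySem.Chars.replace (PySem.Chars.replace (PySem.Chars.replace (PySem.Chars.replace (PySem.Chars.replace l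 "log in".toList "sign in".toList) "Log in".toList "Sign in".toList) "verify".toList "confirm".toList) "Verify".toList "Confirm".toList) "account".toList "user account".toList)).trans (pvScan_empty (PySem.Chars.replace (PySem.Chars.replace (PySem.Chars.replace (PySem.Chars.replace (PySem.Chars.replace (PySem.Chars.replace l "log in".toList "sign in".toList) "Log in".toList "Sign in".toList) "verify".toList "confirm".toList) "Verify".toList "Confirm".toList) "account".toList "user account".toList) "Account".toList "User account".toList))))))))

theorem pvA_eq (text : String) :
    benign_paraphrase text =
      String.ofList ((PySem.Chars.replace (PySem.Chars.replace (PySem.Chars.replace (PySem.Chars.replace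
        (PySem.Chars.replace (PySem.Chars.replace text.toList
          "log in".toList "sign in".toList) "Log in".toList "Sign in".toList)
          "verify".toList "confirm".toList) "Verify".toList "Confirm".toList)
          "account".toList "user account".toList) "Account".toList "User account".toList)) := by
  have h1 : pvCapitalize "log in".toList = "Log in".toList := by decide
  have h2 : pvCapitalize "sign in".toList = "Sign in".toList := by decide
  have h3 : pvCapitalize "verify".toList = "Verify".toList := by decide
  have h4 : pvCapitalize "confirm".toList = "Confirm".toList := by decide
  have h5 : pvCapitalize "account".toList = "Account".toList := by decide
  have h6 : pvCapitalize "user account".toList = "User account".toList := by decide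
  simp only [benign_paraphrase]
  rw [show (PySem.Dict.ofList [("log in", "sign in"), ("verify", "confirm"), ("account", "user account")] : PySem.Dict String String).items = [("log in", "sign in"), ("verify", "confirm"), ("account", "user account")] from rfl]
  simp only [List.foldl_cons, List.foldl_nil, PySem.Str.replace, String.toList_ofList, h1, h2, h3, h4, h5, h6]

-- ===== VERDICT (by name: the statement is the Claim_ definition above) =====
theorem benign_paraphrase_spec : Claim_equal_benign_paraphrase := by
  intro text _
  unfold Spec_benign_paraphrase benign_paraphrase_alt
  rw [pvA_eq, pvChars_main]
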